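-- pv_equiv track=rewrite | github.com/midyear66/Truebuntu | backend/routers/pools.py | _parse_zpool_import
-- ===== SOURCE A (Python) =====
-- def _parse_zpool_import(output: str) -> list[dict]:
--     """Parse ``zpool import`` text output into a list of importable pools."""
--     pools: list[dict] = []
--     current: dict | None = None
--     for line in output.splitlines():
--         stripped = line.strip()
--         if stripped.startswith("pool:"):
--             if current:
--                 pools.append(current)
--             current = {"name": stripped.split(":", 1)[1].strip(), "id": "", "state": "", "status": ""}
--         elif current is not None:
--             if stripped.startswith("id:"):
--                 current["id"] = stripped.split(":", 1)[1].strip()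
--             elif stripped.startswith("state:"):
--                 current["state"] = stripped.split(":", 1)[1].strip()
--             elif stripped.startswith("status:"):
--                 current["status"] = stripped.split(":", 1)[1].strip()
--     if current:
--         pools.append(current)
--     return pools
-- ===== SOURCE B (Python) =====
-- def _parse_zpool_import(output: str) -> list[dict]:
--     """Parse ``zpool import`` text output into a list of importable pools."""
--     # Phase 1: group the stripped lines into per-pool blocks, each starting
--     # at a "pool:" header; lines before the first header are dropped.
--     blocks: list[list[str]] = []
--     for line in output.splitlines():
--         stripped = line.strip()
--         if stripped.startswith("pool:"):
--             blocks.append([stripped])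
--         elif blocks:
--             blocks[-1].append(stripped)
--     # Phase 2: map each block to a pool dict (later occurrences overwrite).
--     pools = []
--     for block in blocks:
--         pool = {"name": block[0].split(":", 1)[1].strip(), "id": "", "state": "", "status": ""}
--         for stripped in block[1:]:
--             for key in ("id", "state", "status"):
--                 if stripped.startswith(key + ":"):
--                     pool[key] = stripped.split(":", 1)[1].strip()
--                     break
--         pools.append(pool)
--     return pools
-- ===== Notes on version B (the rewrite author's own statement) =====
-- stated objective: alternative
-- what changed: A parses in a single stateful pass carrying an optional current dict; B first groups the stripped lines into per-pool blocks (a new block at each 'pool:' header, pre-header lines dropped) and then maps each block to its dict in a second phase.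
import Mathlib
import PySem

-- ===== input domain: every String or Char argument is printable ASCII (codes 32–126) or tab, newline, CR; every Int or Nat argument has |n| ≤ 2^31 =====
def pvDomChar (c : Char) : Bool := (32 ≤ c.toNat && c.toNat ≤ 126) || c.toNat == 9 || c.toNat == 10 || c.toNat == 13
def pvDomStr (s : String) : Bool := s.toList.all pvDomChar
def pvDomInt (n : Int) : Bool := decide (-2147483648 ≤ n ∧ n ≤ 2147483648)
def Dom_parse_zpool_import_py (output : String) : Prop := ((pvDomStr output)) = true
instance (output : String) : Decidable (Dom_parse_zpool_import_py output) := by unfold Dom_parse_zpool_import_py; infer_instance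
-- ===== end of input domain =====

-- B replaces A's single stateful pass (optional current dict) by a group-then-map
-- decomposition: split the lines into per-pool blocks, then map each block to its dict.
-- Objective: alternative (same cost, different structure).

-- ===== PORT A =====
-- stripped.split(":", 1)[1].strip(); the [1] index exists whenever startswith found a
-- prefix containing ':', which is the only context in which either Python calls it,
-- so the .getD defaults are unreachable there.
def pvVal (s : String) : String :=
  PySem.Str.strip (((PySem.Str.splitMax? s ":" 1).getD []).getD 1 "")

-- {"name": v, "id": "", "state": "", "status": ""} as an insertion-order assoc list
def pvInit (v : String) : PySem.Dict String String :=
  PySem.Dict.ofList [("name", v), ("id", ""), ("state", ""), ("status", "")]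

-- the elif id:/state:/status: chain updating the current dict from one stripped line
def pvSet (c : PySem.Dict String String) (s : String) : PySem.Dict String String :=
  if PySem.Str.startswith s "id:" then PySem.Dict.insert c "id" (pvVal s)
  else if PySem.Str.startswith s "state:" then PySem.Dict.insert c "state" (pvVal s)
  else if PySem.Str.startswith s "status:" then PySem.Dict.insert c "status" (pvVal s)
  else c

-- A's loop body over (pools, current).  `current` is always a 4-key dict, hence always
-- truthy in Python, so `if current:` is ported as the not-None match (exact here).
def pvStepA (st : List (PySem.Dict String String) × Option (PySem.Dict String String))
    (line : String) : List (PySem.Dict String String) × Option (PySem.Dict String String) :=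
  let s := PySem.Str.strip line
  if PySem.Str.startswith s "pool:" then
    ((match st.2 with | some c => st.1 ++ [c] | none => st.1), some (pvInit (pvVal s)))
  else
    match st.2 with
    | none => st
    | some c => (st.1, some (pvSet c s))

def parse_zpool_import_py (output : String) : List (List (String × String)) :=
  let fin := List.foldl pvStepA ([], none) (PySem.Str.splitlines output)
  List.map PySem.Dict.items
    (match fin.2 with
     | some c => fin.1 ++ [c]
     | none => fin.1)

-- ===== PORT B =====
-- phase 1 loop body: start a new block at a "pool:" header, otherwise append the
-- stripped line to the last block (blocks[-1].append), dropping pre-header lines.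
def pvStepBlocks (bs : List (List String)) (line : String) : List (List String) :=
  let s := PySem.Str.strip line
  if PySem.Str.startswith s "pool:" then bs ++ [[s]]
  else
    match bs.getLast? with
    | none => bs
    | some last => bs.dropLast ++ [last ++ [s]]

-- phase 2: one block (header first) to its pool dict; the [] case is unreachable
-- since every block starts with its "pool:" header.
def pvDictOf (block : List String) : PySem.Dict String String :=
  match block with
  | [] => PySem.Dict.empty
  | h :: t => List.foldl pvSet (pvInit (pvVal h)) t

def parse_zpool_import_py_alt (output : String) : List (List (String × String)) :=
  List.map PySem.Dict.items
    (List.map pvDictOf (List.foldl pvStepBlocks [] (PySem.Str.splitlines output)))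

-- ===== PRECONDITION & SPEC =====
def Spec_parse_zpool_import_py (output : String) (out : List (List (String × String))) : Prop := out = parse_zpool_import_py_alt output
instance (output : String) (out : List (List (String × String))) : Decidable (Spec_parse_zpool_import_py output out) := by unfold Spec_parse_zpool_import_py; infer_instance

-- ===== CLAIM (what is proved, stated in full; the proofs are below) =====
def Claim_equal_parse_zpool_import_py : Prop := ∀ (output : String), Dom_parse_zpool_import_py output → Spec_parse_zpool_import_py output (parse_zpool_import_py output)

-- ===== LEMMAS AND PROOFS =====

-- reference recursion: A's processing of the remaining lines while a current dict exists
def pvRunA (ls : List String) (c : PySem.Dict String String) : List (PySem.Dict String String) :=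
  match ls with
  | [] => [c]
  | l :: rest =>
    let s := PySem.Str.strip l
    if PySem.Str.startswith s "pool:" then c :: pvRunA rest (pvInit (pvVal s))
    else pvRunA rest (pvSet c s)

-- reference recursion: both programs before the first "pool:" header
def pvSkip (ls : List String) : List (PySem.Dict String String) :=
  match ls with
  | [] => []
  | l :: rest =>
    let s := PySem.Str.strip l
    if PySem.Str.startswith s "pool:" then pvRunA rest (pvInit (pvVal s))
    else pvSkip rest

theorem pvA_run (ls : List String) : ∀ (pools : List (PySem.Dict String String))
    (c : PySem.Dict String String),
    (match (List.foldl pvStepA (pools, some c) ls).2 with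
      | some d => (List.foldl pvStepA (pools, some c) ls).1 ++ [d]
      | none => (List.foldl pvStepA (pools, some c) ls).1) = pools ++ pvRunA ls c := by
  induction ls with
  | nil => intro pools c; simp [pvRunA]
  | cons l rest ih =>
    intro pools c
    simp only [List.foldl_cons, pvRunA, pvStepA]
    by_cases h : PySem.Chars.startswith (PySem.Chars.strip l.toList) ['p', 'o', 'o', 'l', ':'] = true
    · simp [h, ih]
    · simp [h, ih]

theorem pvA_skip (ls : List String) :
    (match (List.foldl pvStepA ([], none) ls).2 with
      | some d => (List.foldl pvStepA ([], none) ls).1 ++ [d]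
      | none => (List.foldl pvStepA ([], none) ls).1) = pvSkip ls := by
  induction ls with
  | nil => simp [pvSkip]
  | cons l rest ih =>
    simp only [List.foldl_cons, pvSkip, pvStepA]
    by_cases h : PySem.Chars.startswith (PySem.Chars.strip l.toList) ['p', 'o', 'o', 'l', ':'] = true
    · simpa [h] using pvA_run rest [] (pvInit (pvVal (PySem.Str.strip l)))
    · simpa [h] using ih

theorem pvB_run (ls : List String) : ∀ (bs : List (List String)) (h : String) (t : List String),
    List.map pvDictOf (List.foldl pvStepBlocks (bs ++ [h :: t]) ls)
      = List.map pvDictOf bs ++ pvRunA ls (List.foldl pvSet (pvInit (pvVal h)) t) := by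
  induction ls with
  | nil => intro bs h t; simp [pvDictOf, pvRunA]
  | cons l rest ih =>
    intro bs h t
    simp only [List.foldl_cons, pvStepBlocks, pvRunA]
    by_cases hp : PySem.Chars.startswith (PySem.Chars.strip l.toList) ['p', 'o', 'o', 'l', ':'] = true
    · simp [hp]
      have eq1 : bs ++ [h :: t, [PySem.Str.strip l]] = (bs ++ [h :: t]) ++ [[PySem.Str.strip l]] := by
        simp
      rw [eq1, ih (bs ++ [h :: t]) (PySem.Str.strip l) []]
      simp [pvDictOf]
    · have hlast : (bs ++ [h :: t]).getLast? = some (h :: t) := by simp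
      have hdrop : (bs ++ [h :: t]).dropLast = bs := by simp
      have h2 := ih bs h (t ++ [PySem.Str.strip l])
      simp only [List.foldl_append, List.foldl_cons, List.foldl_nil] at h2
      simp [hp, hlast, hdrop, h2]

theorem pvB_skip (ls : List String) :
    List.map pvDictOf (List.foldl pvStepBlocks [] ls) = pvSkip ls := by
  induction ls with
  | nil => simp [pvSkip]
  | cons l rest ih =>
    simp only [List.foldl_cons, pvStepBlocks, pvSkip]
    by_cases hp : PySem.Chars.startswith (PySem.Chars.strip l.toList) ['p', 'o', 'o', 'l', ':'] = true
    · simpa [hp, pvDictOf] using pvB_run rest [] (PySem.Str.strip l) []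
    · simpa [hp] using ih

-- ===== VERDICT (by name: the statement is the Claim_ definition above) =====
theorem parse_zpool_import_py_spec : Claim_equal_parse_zpool_import_py := by
  intro output _
  unfold Spec_parse_zpool_import_py parse_zpool_import_py parse_zpool_import_py_alt
  rw [pvB_skip]
  exact congrArg (List.map PySem.Dict.items) (pvA_skip (PySem.Str.splitlines output))
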